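-- pv_equiv track=rewrite | github.com/Media-Smart/volkscv | volkscv/analyzer/visualization/utils.py | get_pallete
-- ===== SOURCE A (Python) =====
-- def get_pallete(categories):
--     """Generate pallete for categories.
--
--     Args:
--         categories (list or tuple): Names of all categories.
--
--     Returns:
--         dict: Pallete of all categories.
--     """
--
--     num_cls = len(categories) + 1
--     color_map = num_cls * [0, 0, 0]
--     for i in range(0, num_cls):
--         j = 0
--         lab = i
--         while lab:
--             color_map[i * 3] |= (((lab >> 0) & 1) << (7 - j))
--             color_map[i * 3 + 1] |= (((lab >> 1) & 1) << (7 - j))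
--             color_map[i * 3 + 2] |= (((lab >> 2) & 1) << (7 - j))
--             j += 1
--             lab >>= 3
--     pallete = dict()
--     for idx, i in enumerate(range(3, len(color_map), 3)):
--         pallete.update({categories[idx]: color_map[i:i + 3]})
--
--     return pallete
-- ===== SOURCE B (Python) =====
-- def get_pallete(categories):
--     """Generate pallete for categories.
--
--     String/base-conversion algorithm: the colour of category idx is obtained by
--     writing i = idx + 1 in binary (LSB first), de-interleaving the bit string
--     into three 8-character strings by slicing with step 3, and reading each
--     slice back as a base-2 number (MSB first) -- no bit-twiddling loop and no
--     intermediate flat colour array.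
--     """
--     pallete = {}
--     for idx, name in enumerate(categories):
--         bits = format(idx + 1, '024b')[::-1]
--         pallete[name] = [int(bits[c::3], 2) for c in range(3)]
--     return pallete
-- ===== Notes on version B (the rewrite author's own statement) =====
-- stated objective: alternative
-- what changed: B replaces A's two-pass bit-twiddling construction (flat color_map array filled by a data-dependent while loop of shift/AND/OR writes, then sliced into a dict) with a string/base-conversion algorithm: each colour is obtained by formatting idx+1 as a 24-character binary string, reversing it, de-interleaving it into three 8-character slices with step-3 string slicing, and parsing each slice back with int(_, 2).
import Mathlib
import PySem

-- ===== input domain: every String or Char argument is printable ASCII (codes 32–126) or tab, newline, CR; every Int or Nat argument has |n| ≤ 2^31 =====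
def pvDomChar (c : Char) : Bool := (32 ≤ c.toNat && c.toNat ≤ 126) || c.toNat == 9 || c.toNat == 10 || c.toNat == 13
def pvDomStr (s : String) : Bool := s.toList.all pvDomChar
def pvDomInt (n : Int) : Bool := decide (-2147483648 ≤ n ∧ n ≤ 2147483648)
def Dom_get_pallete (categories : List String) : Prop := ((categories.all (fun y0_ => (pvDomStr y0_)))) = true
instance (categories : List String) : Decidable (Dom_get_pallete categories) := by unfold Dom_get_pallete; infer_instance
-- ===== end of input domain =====

-- B replaces A's bit-twiddling construction (flat color_map filled by a while loop of
-- shift/AND/OR writes, then sliced into a dict) by a string/base-conversion algorithm: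
-- format idx+1 as a 24-char binary string, reverse it, de-interleave it by step-3 string
-- slicing and parse each of the three 8-char slices back with int(_, 2) (objective: alternative).

-- ===== PORT A =====
-- inner `while lab:` loop of A; `lab`, the loop index `i` and the bit position `j` are
-- nonnegative Python ints, modelled as Nat (Python `>>`, `&`, `|`, `<<` on nonneg ints
-- are Nat's `>>>`, `&&&`, `|||`, `<<<`); the list entries are Python ints, ORed with
-- PySem.Int.bor.  `color_map[x] |= e` is in-range here, hence getD/set.
def pvInnerA (cm : List Int) (i : Nat) (j : Nat) (lab : Nat) : List Int :=
  if lab ≠ 0 then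
    let cm1 := cm.set (i*3) (PySem.Int.bor (cm.getD (i*3) 0) ((((lab >>> 0) &&& 1) <<< (7-j) : Nat) : Int))
    let cm2 := cm1.set (i*3+1) (PySem.Int.bor (cm1.getD (i*3+1) 0) ((((lab >>> 1) &&& 1) <<< (7-j) : Nat) : Int))
    let cm3 := cm2.set (i*3+2) (PySem.Int.bor (cm2.getD (i*3+2) 0) ((((lab >>> 2) &&& 1) <<< (7-j) : Nat) : Int))
    pvInnerA cm3 i (j+1) (lab >>> 3)
  else cm
termination_by lab
decreasing_by
  simp only [Nat.shiftRight_eq_div_pow]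
  exact Nat.div_lt_self (by omega) (by norm_num)

def get_pallete (categories : List String) : List (String × List Int) :=
  let num_cls := categories.length + 1
  let color_map : List Int := (List.replicate num_cls ([0, 0, 0] : List Int)).flatten
  let color_map :=
    (PySem.List.pyRange 0 num_cls 1).foldl (fun cm i => pvInnerA cm i.toNat 0 i.toNat) color_map
  ((PySem.List.enumerate (PySem.List.pyRange 3 (PySem.List.len color_map) 3) 0).foldl
      (fun (d : PySem.Dict String (List Int)) p =>
        d.insert (PySem.List.pyGetD categories p.1 "")
          (PySem.List.slice color_map (some p.2) (some (p.2 + 3))))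
      PySem.Dict.empty).items

-- ===== PORT B =====
-- format(i, '024b'): 24-char zero-padded binary string (MSB first), as a List Char;
-- hand port of the format call, exact for 0 ≤ i < 2^24 (guaranteed by Pre_)
def pvFmt24 (i : Nat) : List Char :=
  (List.range 24).map (fun k => if (i >>> (23 - k)) &&& 1 == 1 then '1' else '0')

-- int(s, 2): base-2 parse of a '0'/'1' string; hand port, exact on such strings
def pvParse2 (s : List Char) : Nat :=
  s.foldl (fun a c => 2 * a + (if c == '1' then 1 else 0)) 0

-- s[c::3] after the leading `drop c`: extended slicing with step 3 (every third char);
-- hand port, exact for nonnegative start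
def pvStep3 : List Char → List Char
  | [] => []
  | [c] => [c]
  | [c, _] => [c]
  | c :: _ :: _ :: rest => c :: pvStep3 rest

def get_pallete_alt (categories : List String) : List (String × List Int) :=
  ((PySem.List.enumerate categories 0).foldl
      (fun (d : PySem.Dict String (List Int)) p =>
        -- bits = format(idx + 1, '024b')[::-1]; idx ≥ 0, so toNat is exact
        d.insert p.2
          ((List.range 3).map (fun c =>
            ((pvParse2 (pvStep3 (((pvFmt24 (p.1 + 1).toNat).reverse).drop c)) : Nat) : Int))))
      PySem.Dict.empty).items

-- ===== PRECONDITION & SPEC =====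
-- Pre_ excludes lists of at least 2^24 categories: there A's `while lab` loop reaches
-- j = 8 and `<< (7 - j)` raises ValueError (negative shift count); B returns a value.
def Pre_get_pallete (categories : List String) : Prop := categories.length < 16777216
instance (categories : List String) : Decidable (Pre_get_pallete categories) := by
  unfold Pre_get_pallete; infer_instance

def pvWitness_get_pallete : List String := ["person", "car", "dog"]

def Spec_get_pallete (categories : List String) (out : List (String × List Int)) : Prop :=
  out = get_pallete_alt categories
instance (categories : List String) (out : List (String × List Int)) :
    Decidable (Spec_get_pallete categories out) := by unfold Spec_get_pallete; infer_instance

-- ===== CLAIM (what is proved, stated in full; the proofs are below) =====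
def Claim_equal_get_pallete : Prop :=
  ∀ (categories : List String), Dom_get_pallete categories → Pre_get_pallete categories →
    Spec_get_pallete categories (get_pallete categories)

-- ===== LEMMAS AND PROOFS =====

-- accumulator view of A's inner while loop (proof-side only)
def pvSpreadW (j lab : Nat) (r g b : Int) : Int × Int × Int :=
  if lab ≠ 0 then
    pvSpreadW (j+1) (lab >>> 3)
      (PySem.Int.bor r ((((lab >>> 0) &&& 1) <<< (7-j) : Nat) : Int))
      (PySem.Int.bor g ((((lab >>> 1) &&& 1) <<< (7-j) : Nat) : Int))
      (PySem.Int.bor b ((((lab >>> 2) &&& 1) <<< (7-j) : Nat) : Int))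
  else (r, g, b)
termination_by lab
decreasing_by
  simp only [Nat.shiftRight_eq_div_pow]
  exact Nat.div_lt_self (by omega) (by norm_num)

-- the colour triple A ends up storing for index i
def pvTriple (i : Nat) : List Int :=
  [(pvSpreadW 0 i 0 0 0).1, (pvSpreadW 0 i 0 0 0).2.1, (pvSpreadW 0 i 0 0 0).2.2]

-- bounded-fold view of the spreading (proof-side only; bridge between the two ports)
def pvSpreadB (i : Nat) : Nat × Nat × Nat :=
  (List.range 8).foldl
    (fun acc k =>
      (acc.1 ||| (((i >>> (3*k)) &&& 1) <<< (7-k)),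
       acc.2.1 ||| (((i >>> (3*k+1)) &&& 1) <<< (7-k)),
       acc.2.2 ||| (((i >>> (3*k+2)) &&& 1) <<< (7-k))))
    (0, 0, 0)

theorem pvFlat_len (l : List Nat) : (l.flatMap pvTriple).length = 3 * l.length := by
  induction l with
  | nil => simp
  | cons x xs ih => simp [pvTriple, ih]; omega

theorem pvInnerA_eq (lab : Nat) : ∀ (cm : List Int) (i j : Nat), i*3+2 < cm.length →
    pvInnerA cm i j lab =
      ((cm.set (i*3) (pvSpreadW j lab (cm.getD (i*3) 0) (cm.getD (i*3+1) 0) (cm.getD (i*3+2) 0)).1).set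
        (i*3+1) (pvSpreadW j lab (cm.getD (i*3) 0) (cm.getD (i*3+1) 0) (cm.getD (i*3+2) 0)).2.1).set
        (i*3+2) (pvSpreadW j lab (cm.getD (i*3) 0) (cm.getD (i*3+1) 0) (cm.getD (i*3+2) 0)).2.2 := by
  induction lab using Nat.strong_induction_on with
  | _ lab IH =>
    intro cm i j h
    by_cases hl : lab = 0
    · subst hl
      rw [pvInnerA, pvSpreadW]
      simp only [ne_eq, not_true_eq_false, if_false]
      rw [List.getD_eq_getElem cm 0 (by omega), List.getD_eq_getElem cm 0 (by omega),
        List.getD_eq_getElem cm 0 h]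
      rw [List.set_getElem_self, List.set_getElem_self, List.set_getElem_self]
    · rw [pvInnerA, pvSpreadW]
      simp only [hl, ne_eq, not_false_eq_true, if_true]
      have hlt : lab >>> 3 < lab := by
        simp only [Nat.shiftRight_eq_div_pow]
        exact Nat.div_lt_self (by omega) (by norm_num)
      have gset : ∀ (l : List Int) (a b : Nat) (v : Int), a ≠ b →
          (l.set a v).getD b 0 = l.getD b 0 := by
        intro l a b v hne
        simp [List.getD_eq_getElem?_getD, List.getElem?_set_ne hne]
      have gself : ∀ (l : List Int) (a : Nat) (v : Int), a < l.length →
          (l.set a v).getD a 0 = v := by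
        intro l a v ha
        rw [List.getD_eq_getElem _ 0 (by simpa using ha)]
        exact List.getElem_set_self (by simpa using ha)
      rw [IH (lab >>> 3) hlt _ i (j+1) (by simp; omega)]
      -- abbreviations for the three freshly written values
      set c0 := PySem.Int.bor (cm.getD (i*3) 0) ((((lab >>> 0) &&& 1) <<< (7-j) : Nat) : Int) with hc0
      set c1' := PySem.Int.bor (((cm.set (i*3) c0).getD (i*3+1)) 0) ((((lab >>> 1) &&& 1) <<< (7-j) : Nat) : Int) with hc1
      set cm2 := (cm.set (i*3) c0).set (i*3+1) c1'
      set c2' := PySem.Int.bor ((cm2.getD (i*3+2)) 0) ((((lab >>> 2) &&& 1) <<< (7-j) : Nat) : Int) with hc2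
      have g1 : ((cm.set (i*3) c0).getD (i*3+1)) 0 = cm.getD (i*3+1) 0 :=
        gset _ _ _ _ (by omega)
      have g2 : (cm2.getD (i*3+2)) 0 = cm.getD (i*3+2) 0 := by
        simp only [cm2]
        rw [gset _ _ _ _ (by omega : i*3+1 ≠ i*3+2), gset _ _ _ _ (by omega : i*3 ≠ i*3+2)]
      set cm3 := cm2.set (i*3+2) c2'
      have e0 : cm3.getD (i*3) 0 = c0 := by
        simp only [cm3, cm2]
        rw [gset _ _ _ _ (by omega : i*3+2 ≠ i*3), gset _ _ _ _ (by omega : i*3+1 ≠ i*3),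
          gself _ _ _ (by omega)]
      have e1 : cm3.getD (i*3+1) 0 = c1' := by
        simp only [cm3, cm2]
        rw [gset _ _ _ _ (by omega : i*3+2 ≠ i*3+1), gself _ _ _ (by simp; omega)]
      have e2 : cm3.getD (i*3+2) 0 = c2' := by
        simp only [cm3]
        rw [gself _ _ _ (by simp only [cm2]; simp; omega)]
      rw [e0, e1, e2]
      have hc1'' : PySem.Int.bor (cm.getD (i*3+1) 0) ((((lab >>> 1) &&& 1) <<< (7-j) : Nat) : Int) = c1' := by
        rw [hc1, g1]
      have hc2'' : PySem.Int.bor (cm.getD (i*3+2) 0) ((((lab >>> 2) &&& 1) <<< (7-j) : Nat) : Int) = c2' := by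
        rw [hc2, g2]
      rw [hc1'', hc2'']
      -- now pure set algebra: collapse repeated sets over cm3 into sets over cm
      simp only [cm3, cm2]
      generalize (pvSpreadW (j+1) (lab >>> 3) c0 c1' c2') = w
      obtain ⟨w1, w2, w3⟩ := w
      simp only
      -- collapse the repeated writes: compare elementwise
      apply List.ext_getElem (by simp)
      intro n h1 h2
      simp only [List.getElem_set]
      split_ifs <;> rfl

theorem pvOuter_eq (n : Nat) :
    (List.range n).foldl (fun cm i => pvInnerA cm i 0 i)
        ((List.replicate n ([0, 0, 0] : List Int)).flatten) =
      (List.range n).flatMap pvTriple := by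
  have hflat : ∀ (m : Nat), (List.replicate m ([0, 0, 0] : List Int)).flatten =
      List.replicate (3*m) 0 := by
    intro m
    induction m with
    | zero => simp
    | succ k ih =>
      rw [List.replicate_succ, List.flatten_cons, ih, show 3*(k+1) = 3+3*k by ring,
        List.replicate_add]
      rfl
  have hlen := pvFlat_len
  have main : ∀ (m : Nat), m ≤ n →
      (List.range m).foldl (fun cm i => pvInnerA cm i 0 i) (List.replicate (3*n) (0 : Int)) =
        (List.range m).flatMap pvTriple ++ List.replicate (3*(n-m)) (0 : Int) := by
    intro m hm
    induction m with
    | zero => simp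
    | succ k ih =>
      rw [List.range_succ, List.foldl_append, ih (by omega), List.foldl_cons, List.foldl_nil]
      set P := (List.range k).flatMap pvTriple with hP
      have hPlen : P.length = 3 * k := by rw [hP, hlen]; simp
      have hrep : List.replicate (3*(n-k)) (0 : Int) =
          [0, 0, 0] ++ List.replicate (3*(n-(k+1))) (0 : Int) := by
        have : 3*(n-k) = 3*(n-(k+1))+1+1+1 := by omega
        rw [this]
        simp [List.replicate_succ]
      rw [pvInnerA_eq _ _ _ _ (by simp [hPlen]; omega)]
      have hget : ∀ (idx : Nat), 3*k ≤ idx → idx < 3*n →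
          (P ++ List.replicate (3*(n-k)) (0 : Int)).getD idx 0 = 0 := by
        intro idx h1 h2
        rw [List.getD_eq_getElem _ 0 (by simp [hPlen]; omega), List.getElem_append]
        split
        · omega
        · simp
      rw [hget (k*3) (by omega) (by omega), hget (k*3+1) (by omega) (by omega),
        hget (k*3+2) (by omega) (by omega)]
      rw [List.flatMap_append, ← hP, List.flatMap_cons, List.flatMap_nil,
        List.append_nil, List.append_assoc]
      rw [hrep]
      have hset : ∀ (idx : Nat) (v : Int) (rest : List Int), 3*k ≤ idx →
          (P ++ rest).set idx v = P ++ rest.set (idx - 3*k) v := by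
        intro idx v rest hidx
        rw [List.set_append]
        split
        · omega
        · congr 2
          omega
      rw [hset _ _ _ (by omega), hset _ _ _ (by omega), hset _ _ _ (by omega)]
      have e0 : k*3 - 3*k = 0 := by omega
      have e1 : k*3+1 - 3*k = 1 := by omega
      have e2 : k*3+2 - 3*k = 2 := by omega
      rw [e0, e1, e2]
      simp [pvTriple]
  have := main n (le_refl n)
  simp only [Nat.sub_self, Nat.mul_zero, List.replicate_zero, List.append_nil] at this
  rw [hflat, this]

theorem pvSpreadW_eq_B (i : Nat) (h : i < 16777216) :
    pvSpreadW 0 i 0 0 0 =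
      (((pvSpreadB i).1 : Int), ((pvSpreadB i).2.1 : Int), ((pvSpreadB i).2.2 : Int)) := by
  set stepB := fun (acc : Nat × Nat × Nat) (k : Nat) =>
      (acc.1 ||| (((i >>> (3*k)) &&& 1) <<< (7-k)),
       acc.2.1 ||| (((i >>> (3*k+1)) &&& 1) <<< (7-k)),
       acc.2.2 ||| (((i >>> (3*k+2)) &&& 1) <<< (7-k))) with hstep
  have hsr : ∀ (j t : Nat), (i >>> (3*j)) >>> t = i >>> (3*j+t) := by
    intro j t
    rw [← Nat.shiftRight_add]
  have tail0 : ∀ (d j : Nat), i >>> (3*j) = 0 → ∀ (acc : Nat × Nat × Nat),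
      (List.range' j d).foldl stepB acc = acc := by
    intro d
    induction d with
    | zero => intro j _ acc; simp
    | succ e ih =>
      intro j h0 acc
      rw [List.range'_succ, List.foldl_cons]
      have b0 : ∀ (t : Nat), (i >>> (3*j+t)) &&& 1 = 0 := by
        intro t
        rw [← hsr, h0]
        simp
      have hstep0 : stepB acc j = acc := by
        rw [hstep]
        simp only
        rw [show 3*j = 3*j+0 by omega, b0 0, b0 1, b0 2]
        simp
      rw [hstep0]
      apply ih
      rw [show 3*(j+1) = 3*j+3 by omega, ← hsr, h0]
      simp
  have gen : ∀ (d j : Nat), j + d = 8 → ∀ (r g b : Nat),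
      pvSpreadW j (i >>> (3*j)) (r : Int) (g : Int) (b : Int) =
        ((((List.range' j d).foldl stepB (r, g, b)).1 : Int),
         ((((List.range' j d).foldl stepB (r, g, b)).2.1 : Int)),
         ((((List.range' j d).foldl stepB (r, g, b)).2.2 : Int))) := by
    intro d
    induction d with
    | zero =>
      intro j hj r g b
      have h0 : i >>> (3*j) = 0 := by
        rw [Nat.shiftRight_eq_div_pow]
        apply Nat.div_eq_of_lt
        calc i < 16777216 := h
          _ ≤ 2^(3*j) := by rw [show 3*j = 24 by omega]; norm_num
      rw [h0, pvSpreadW]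
      simp
    | succ e ih =>
      intro j hj r g b
      by_cases h0 : i >>> (3*j) = 0
      · rw [h0, pvSpreadW, tail0 (e+1) j h0]
        simp
      · rw [pvSpreadW]
        simp only [h0, ne_eq, not_false_eq_true, if_true]
        rw [List.range'_succ, List.foldl_cons]
        have a0 : (i >>> (3*j)) >>> 0 = i >>> (3*j+0) := hsr j 0
        have a1 : (i >>> (3*j)) >>> 1 = i >>> (3*j+1) := hsr j 1
        have a2 : (i >>> (3*j)) >>> 2 = i >>> (3*j+2) := hsr j 2
        have a3 : (i >>> (3*j)) >>> 3 = i >>> (3*(j+1)) := by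
          rw [hsr, show (3*j+3 : Nat) = 3*(j+1) from by omega]
        rw [PySem.Int.bor_natCast, PySem.Int.bor_natCast, PySem.Int.bor_natCast,
          a0, a1, a2, a3, ih (j+1) (by omega)]
        rw [hstep]
        simp only
        rw [show 3*j+0 = 3*j by omega]
  have h8 : List.range' 0 8 = List.range 8 := by rw [List.range_eq_range']
  have := gen 8 0 (by omega) 0 0 0
  rw [show (3*0 : Nat) = 0 by omega] at this
  simp only [Nat.shiftRight_zero, Nat.cast_zero] at this
  rw [this, pvSpreadB, ← h8]

theorem pvFlat_slice (l : List Nat) : ∀ (j : Nat), j < l.length →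
    ((l.flatMap pvTriple).drop (3*j)).take 3 = pvTriple (l.getD j 0) := by
  induction l with
  | nil => intro j hj; simp at hj
  | cons x xs ih =>
    intro j hj
    cases j with
    | zero => simp [pvTriple]
    | succ k =>
      rw [List.flatMap_cons, List.drop_append]
      have h3 : (pvTriple x).length = 3 := by simp [pvTriple]
      rw [h3, show (pvTriple x).drop (3*(k+1)) = [] from List.drop_eq_nil_of_le (by omega),
        List.nil_append, show 3*(k+1) - 3 = 3*k by omega]
      rw [ih k (by simpa using hj)]
      simp

-- ===== bridging B's string/base-2 computation to the bit triples =====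

theorem pvRange8 : List.range 8 = [0, 1, 2, 3, 4, 5, 6, 7] := by decide

theorem pvRange24 : List.range 24 =
    [0, 1, 2, 3, 4, 5, 6, 7, 8, 9, 10, 11, 12, 13, 14, 15, 16, 17, 18, 19, 20, 21, 22, 23] := by
  decide

theorem pvDrop1 (a : Char) (l : List Char) : (a :: l).drop 1 = l := rfl

theorem pvDrop2 (a b : Char) (l : List Char) : (a :: b :: l).drop 2 = l := rfl

-- one character of the bit string, read back as the bit it encodes
theorem pvChi (x : Nat) :
    (if (if x &&& 1 == 1 then '1' else '0') == '1' then (1 : Nat) else 0) = x &&& 1 := by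
  rcases Nat.le_one_iff_eq_zero_or_eq_one.mp (Nat.and_le_right : x &&& 1 ≤ 1) with h | h <;>
    rw [h] <;> rfl

-- the reversed bit string lists the bits LSB first
theorem pvRevFmt (i : Nat) :
    (pvFmt24 i).reverse =
      (List.range 24).map (fun t => if (i >>> t) &&& 1 == 1 then '1' else '0') := by
  apply List.ext_getElem
  · simp [pvFmt24]
  · intro t h1 h2
    rw [List.getElem_reverse]
    simp only [pvFmt24, List.getElem_map, List.getElem_range, List.length_map, List.length_range]
    have ht : t < 24 := by simpa [pvFmt24] using h1
    have : 23 - (24 - 1 - t) = t := by omega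
    rw [this]

-- an OR of eight disjoint shifted bits equals the MSB-first base-2 value of those bits
theorem pvChain (b0 b1 b2 b3 b4 b5 b6 b7 : Nat)
    (h0 : b0 ≤ 1) (h1 : b1 ≤ 1) (h2 : b2 ≤ 1) (h3 : b3 ≤ 1)
    (h4 : b4 ≤ 1) (h5 : b5 ≤ 1) (h6 : b6 ≤ 1) (h7 : b7 ≤ 1) :
    0 ||| (b0 <<< 7) ||| (b1 <<< 6) ||| (b2 <<< 5) ||| (b3 <<< 4)
      ||| (b4 <<< 3) ||| (b5 <<< 2) ||| (b6 <<< 1) ||| (b7 <<< 0)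
    = 2*(2*(2*(2*(2*(2*(2*b0+b1)+b2)+b3)+b4)+b5)+b6)+b7 := by
  interval_cases b0 <;> interval_cases b1 <;> interval_cases b2 <;> interval_cases b3 <;>
    interval_cases b4 <;> interval_cases b5 <;> interval_cases b6 <;> interval_cases b7 <;> decide

theorem pvChan0 (i : Nat) :
    pvParse2 (pvStep3 (((pvFmt24 i).reverse).drop 0)) = (pvSpreadB i).1 := by
  rw [pvRevFmt]
  simp only [pvRange24, List.map_cons, List.map_nil, List.drop_zero,
    pvStep3, pvParse2, List.foldl_cons, List.foldl_nil, pvChi,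
    pvSpreadB, pvRange8, Nat.reduceMul, Nat.reduceAdd, Nat.reduceSub, Nat.zero_add]
  rw [pvChain _ _ _ _ _ _ _ _ Nat.and_le_right Nat.and_le_right Nat.and_le_right
    Nat.and_le_right Nat.and_le_right Nat.and_le_right Nat.and_le_right Nat.and_le_right]

theorem pvChan1 (i : Nat) :
    pvParse2 (pvStep3 (((pvFmt24 i).reverse).drop 1)) = (pvSpreadB i).2.1 := by
  rw [pvRevFmt]
  simp only [pvRange24, List.map_cons, List.map_nil, pvDrop1,
    pvStep3, pvParse2, List.foldl_cons, List.foldl_nil, pvChi,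
    pvSpreadB, pvRange8, Nat.reduceMul, Nat.reduceAdd, Nat.reduceSub, Nat.zero_add]
  rw [pvChain _ _ _ _ _ _ _ _ Nat.and_le_right Nat.and_le_right Nat.and_le_right
    Nat.and_le_right Nat.and_le_right Nat.and_le_right Nat.and_le_right Nat.and_le_right]

theorem pvChan2 (i : Nat) :
    pvParse2 (pvStep3 (((pvFmt24 i).reverse).drop 2)) = (pvSpreadB i).2.2 := by
  rw [pvRevFmt]
  simp only [pvRange24, List.map_cons, List.map_nil, pvDrop2,
    pvStep3, pvParse2, List.foldl_cons, List.foldl_nil, pvChi,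
    pvSpreadB, pvRange8, Nat.reduceMul, Nat.reduceAdd, Nat.reduceSub, Nat.zero_add]
  rw [pvChain _ _ _ _ _ _ _ _ Nat.and_le_right Nat.and_le_right Nat.and_le_right
    Nat.and_le_right Nat.and_le_right Nat.and_le_right Nat.and_le_right Nat.and_le_right]

-- B's colour for index i is exactly the triple A stores for index i
theorem pvChanTriple (i : Nat) (h : i < 16777216) :
    (List.range 3).map (fun c =>
        ((pvParse2 (pvStep3 (((pvFmt24 i).reverse).drop c)) : Nat) : Int)) = pvTriple i := by
  rw [pvTriple, pvSpreadW_eq_B i h]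
  rw [show List.range 3 = [0, 1, 2] from by decide]
  simp only [List.map_cons, List.map_nil]
  rw [pvChan0, pvChan1, pvChan2]

-- ===== VERDICT (by name: the statement is the Claim_ definition above) =====
theorem get_pallete_spec : Claim_equal_get_pallete := by
  intro categories _hdom hpre
  unfold Pre_get_pallete at hpre
  unfold Spec_get_pallete
  simp only [get_pallete, get_pallete_alt]
  set n := categories.length with hn
  -- step 1: the outer loop over pyRange 0 (n+1) 1 is the loop over List.range (n+1)
  have hr0 : ∀ (init : List Int),
      (PySem.List.pyRange 0 (n+1 : Nat) 1).foldl (fun cm i => pvInnerA cm i.toNat 0 i.toNat) init =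
        (List.range (n+1)).foldl (fun cm i => pvInnerA cm i 0 i) init := by
    intro init
    rw [PySem.List.pyRange_zero_natCast, List.foldl_map]
    simp only [Int.toNat_natCast]
  rw [hr0, pvOuter_eq]
  set cm := (List.range (n+1)).flatMap pvTriple with hcm
  have hcmlen : cm.length = 3*(n+1) := by rw [hcm, pvFlat_len]; simp
  -- step 2: the slice range has exactly n elements, 3, 6, ..., 3n
  have hr3 : PySem.List.pyRange 3 (PySem.List.len cm) 3 =
      (List.range n).map (fun k : Nat => (3 : Int) + 3*(k : Int)) := by
    rw [PySem.List.len_eq, hcmlen, PySem.List.pyRange_of_pos _ _ (by norm_num)]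
    have hcount : (if (3:Int) < ((3*(n+1) : Nat) : Int)
        then ((((3*(n+1) : Nat) : Int) - 3 + 3 - 1)/3).toNat else 0) = n := by
      split
      · push_cast
        omega
      · rename_i hlt
        push_cast at hlt
        omega
    rw [hcount]
  rw [hr3]
  -- step 3: both dict-building folds run over lists in lockstep
  have hLA : PySem.List.enumerate ((List.range n).map (fun k : Nat => (3 : Int) + 3*(k : Int))) 0 =
      (PySem.List.enumerate categories 0).map (fun p => (p.1, (3 : Int) + 3*p.1)) := by
    apply List.ext_getElem
    · simp [PySem.List.length_enumerate]
      exact hn.symm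
    · intro k h1 h2
      simp only [List.getElem_map]
      rw [PySem.List.getElem_enumerate, PySem.List.getElem_enumerate]
      simp
  rw [hLA, List.foldl_map]
  apply congrArg
  apply PySem.List.foldl_congr_mem
  intro acc p hp
  rw [PySem.List.mem_enumerate_iff] at hp
  obtain ⟨k, hk, hpk⟩ := hp
  subst hpk
  simp only [zero_add]
  have hkey : PySem.List.pyGetD categories ((k : Int)) "" = categories[k] := by
    rw [PySem.List.pyGetD_natCast, List.getD_eq_getElem _ _ hk]
  have hcast : ((3 : Int) + 3*(k : Int)) = ((3*(k+1) : Nat) : Int) := by push_cast; ring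
  have hval : PySem.List.slice cm (some ((3 : Int) + 3*(k : Int)))
      (some ((3 : Int) + 3*(k : Int) + 3)) = pvTriple (k+1) := by
    rw [hcast, show ((3*(k+1) : Nat) : Int) + 3 = ((3*(k+1) : Nat) : Int) + ((3 : Nat) : Int) from by norm_num,
      PySem.List.slice_natCast_add, hcm, pvFlat_slice _ (k+1) (by simp; omega)]
    congr 1
    rw [List.getD_eq_getElem _ _ (by simp; omega), List.getElem_range]
  have hi : (((k : Int)) + 1).toNat = k + 1 := by omega
  rw [hkey, hval, hi, pvChanTriple (k+1) (by omega)]
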